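-- pv_equiv track=rewrite | github.com/cogito30/py_coding_test | programmers/Lv0/120956.py | solution
-- ===== SOURCE A (Python) =====
-- def solution(babbling):
--     answer = 0
--     cousin = ["aya", "ye", "woo", "ma"]
--
--     for babble in babbling:
--         start = 0
--         for i in range(1, len(babble) + 1):
--             if babble[start:i] in cousin:
--                 start = i
--
--         if start == len(babble):
--             answer += 1
--
--     return answer
-- ===== SOURCE B (Python) =====
-- def solution(babbling):
--     words = ("aya", "ye", "woo", "ma")
--
--     def ok(s):
--         if not s:
--             return True
--         return any(s.startswith(w) and ok(s[len(w):]) for w in words)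
--
--     return sum(ok(b) for b in babbling)
-- ===== Notes on version B (the rewrite author's own statement) =====
-- stated objective: alternative
-- what changed: Replaces A's index loop that slices babble[start:i] for every i and tracks the last matched cut with a recursive decomposition: a string is valid iff it is empty or starts with one of the four words and the rest is valid (correct because the word set has pairwise-distinct first letters, so the parse is deterministic).
import Mathlib
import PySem

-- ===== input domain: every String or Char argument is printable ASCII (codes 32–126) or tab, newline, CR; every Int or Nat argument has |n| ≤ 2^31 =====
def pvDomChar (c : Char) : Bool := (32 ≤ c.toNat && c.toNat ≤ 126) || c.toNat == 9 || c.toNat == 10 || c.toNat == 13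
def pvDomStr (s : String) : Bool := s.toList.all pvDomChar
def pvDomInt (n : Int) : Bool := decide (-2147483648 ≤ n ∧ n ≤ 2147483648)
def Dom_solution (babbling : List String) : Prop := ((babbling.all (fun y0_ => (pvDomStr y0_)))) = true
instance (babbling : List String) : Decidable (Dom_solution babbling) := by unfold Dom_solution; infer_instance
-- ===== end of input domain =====

-- B replaces A's slice-every-prefix index loop by a direct recursive decomposition
-- (empty, or one of the four words followed by a valid rest); alternative, not faster.

-- ===== PORT A =====
-- cousin = ["aya", "ye", "woo", "ma"] (strings as code-point lists)
def cousin : List (List Char) := [['a','y','a'], ['y','e'], ['w','o','o'], ['m','a']]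

def solution (babbling : List String) : Int :=
  babbling.foldl (fun answer babble =>
    let l := babble.toList
    let start : Int :=
      (PySem.List.pyRange 1 ((l.length : Int) + 1) 1).foldl
        (fun start i =>
          if PySem.List.slice l (some start) (some i) ∈ cousin then i else start) 0
    if start = (l.length : Int) then answer + 1 else answer) 0

-- ===== PORT B =====
-- ok(s): empty, or starts with one of "aya","ye","woo","ma" and the rest is ok
def okB : List Char → Bool
  | [] => true
  | c :: rest =>
      (decide ((c :: rest).take 3 = ['a','y','a']) && okB ((c :: rest).drop 3)) ||
      (decide ((c :: rest).take 2 = ['y','e']) && okB ((c :: rest).drop 2)) ||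
      (decide ((c :: rest).take 3 = ['w','o','o']) && okB ((c :: rest).drop 3)) ||
      (decide ((c :: rest).take 2 = ['m','a']) && okB ((c :: rest).drop 2))
  termination_by l => l.length
  decreasing_by all_goals (simp [List.length_drop]; try omega)

def solution_alt (babbling : List String) : Int :=
  babbling.foldl (fun acc b => acc + (if okB b.toList then 1 else 0)) 0

-- ===== PRECONDITION & SPEC =====
def Spec_solution (babbling : List String) (out : Int) : Prop := out = solution_alt babbling
instance (babbling : List String) (out : Int) : Decidable (Spec_solution babbling out) := by unfold Spec_solution; infer_instance

-- ===== CLAIM (what is proved, stated in full; the proofs are below) =====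
def Claim_equal_solution : Prop := ∀ (babbling : List String), Dom_solution babbling → Spec_solution babbling (solution babbling)

-- ===== LEMMAS AND PROOFS =====

theorem foldl_fix {α β : Type} (f : β → α → β) (a : β) (xs : List α)
    (h : ∀ x ∈ xs, f a x = a) : xs.foldl f a = a := by
  induction xs with
  | nil => rfl
  | cons x xs ih =>
      simp only [List.foldl_cons, h x (by simp)]
      exact ih (fun y hy => h y (by simp [hy]))

theorem slice1 (l : List Char) (p : Nat) :
    PySem.List.slice l (some (p : Int)) (some ((p : Int) + 1)) = (l.drop p).take 1 := by
  have h := PySem.List.slice_natCast_add l p 1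
  norm_num at h
  exact h

theorem slice2 (l : List Char) (p : Nat) :
    PySem.List.slice l (some (p : Int)) (some ((p : Int) + 2)) = (l.drop p).take 2 := by
  have h := PySem.List.slice_natCast_add l p 2
  norm_num at h
  exact h

theorem slice3 (l : List Char) (p : Nat) :
    PySem.List.slice l (some (p : Int)) (some ((p : Int) + 3)) = (l.drop p).take 3 := by
  have h := PySem.List.slice_natCast_add l p 3
  norm_num at h
  exact h

-- the inner loop of A, starting at position p, reaches the end iff okB accepts the rest
theorem loop_iff (l : List Char) (p : Nat) (hp : p ≤ l.length) :
    ((PySem.List.pyRange ((p : Int) + 1) ((l.length : Int) + 1) 1).foldl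
        (fun s i =>
          if PySem.List.slice l (some s) (some i) ∈ cousin then i else s) (p : Int)
      = (l.length : Int)) ↔ okB (l.drop p) = true := by
  by_cases hw : ∃ w ∈ cousin, w <+: l.drop p
  · obtain ⟨w, hwc, hpre⟩ := hw
    obtain ⟨t', ht⟩ := hpre
    have hlen : (l.drop p).length = l.length - p := List.length_drop
    simp only [cousin, List.mem_cons, List.not_mem_nil, or_false] at hwc
    rcases hwc with rfl | rfl | rfl | rfl
    · -- w = "aya"
      have hL : p + 3 ≤ l.length := by
        rw [← ht] at hlen; simp at hlen; omega
      have hd : l.drop p = 'a' :: 'y' :: 'a' :: t' := ht.symm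
      rw [PySem.List.pyRange_one_append ((p : Int) + 1) ((p : Int) + 4) ((l.length : Int) + 1)
            (by omega) (by omega), List.foldl_append,
          PySem.List.pyRange_one_cons (show (p : Int) + 1 < (p : Int) + 4 by omega),
          show (p : Int) + 1 + 1 = (p : Int) + 2 by ring,
          PySem.List.pyRange_one_cons (show (p : Int) + 2 < (p : Int) + 4 by omega),
          show (p : Int) + 2 + 1 = (p : Int) + 3 by ring,
          PySem.List.pyRange_one_cons (show (p : Int) + 3 < (p : Int) + 4 by omega),
          show (p : Int) + 3 + 1 = (p : Int) + 4 by ring,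
          PySem.List.pyRange_one_eq_nil (le_refl ((p : Int) + 4))]
      have e1 : (if PySem.List.slice l (some (p : Int)) (some ((p : Int) + 1)) ∈ cousin
          then ((p : Int) + 1) else (p : Int)) = (p : Int) := by
        rw [slice1, hd]; norm_num [cousin]; all_goals first | rfl | decide
      have e2 : (if PySem.List.slice l (some (p : Int)) (some ((p : Int) + 2)) ∈ cousin
          then ((p : Int) + 2) else (p : Int)) = (p : Int) := by
        rw [slice2, hd]; norm_num [cousin]; all_goals first | rfl | decide
      have e3 : (if PySem.List.slice l (some (p : Int)) (some ((p : Int) + 3)) ∈ cousin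
          then ((p : Int) + 3) else (p : Int)) = (p : Int) + 3 := by
        rw [slice3, hd]; norm_num [cousin]
      simp only [List.foldl_cons, List.foldl_nil]
      rw [e1, e2, e3]
      rw [show (p : Int) + 4 = ((p + 3 : Nat) : Int) + 1 by push_cast; ring,
          show (p : Int) + 3 = ((p + 3 : Nat) : Int) by push_cast; ring,
          loop_iff l (p + 3) hL,
          show l.drop (p + 3) = t' by
            rw [← List.drop_drop, hd]; simp,
          show okB (l.drop p) = okB t' by rw [hd]; simp [okB]]
    · -- w = "ye"
      have hL : p + 2 ≤ l.length := by
        rw [← ht] at hlen; simp at hlen; omega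
      have hd : l.drop p = 'y' :: 'e' :: t' := ht.symm
      rw [PySem.List.pyRange_one_append ((p : Int) + 1) ((p : Int) + 3) ((l.length : Int) + 1)
            (by omega) (by omega), List.foldl_append,
          PySem.List.pyRange_one_cons (show (p : Int) + 1 < (p : Int) + 3 by omega),
          show (p : Int) + 1 + 1 = (p : Int) + 2 by ring,
          PySem.List.pyRange_one_cons (show (p : Int) + 2 < (p : Int) + 3 by omega),
          show (p : Int) + 2 + 1 = (p : Int) + 3 by ring,
          PySem.List.pyRange_one_eq_nil (le_refl ((p : Int) + 3))]
      have e1 : (if PySem.List.slice l (some (p : Int)) (some ((p : Int) + 1)) ∈ cousin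
          then ((p : Int) + 1) else (p : Int)) = (p : Int) := by
        rw [slice1, hd]; norm_num [cousin]; all_goals first | rfl | decide
      have e2 : (if PySem.List.slice l (some (p : Int)) (some ((p : Int) + 2)) ∈ cousin
          then ((p : Int) + 2) else (p : Int)) = (p : Int) + 2 := by
        rw [slice2, hd]; norm_num [cousin]
      simp only [List.foldl_cons, List.foldl_nil]
      rw [e1, e2]
      rw [show (p : Int) + 3 = ((p + 2 : Nat) : Int) + 1 by push_cast; ring,
          show (p : Int) + 2 = ((p + 2 : Nat) : Int) by push_cast; ring,
          loop_iff l (p + 2) hL,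
          show l.drop (p + 2) = t' by
            rw [← List.drop_drop, hd]; simp,
          show okB (l.drop p) = okB t' by rw [hd]; simp [okB]]
    · -- w = "woo"
      have hL : p + 3 ≤ l.length := by
        rw [← ht] at hlen; simp at hlen; omega
      have hd : l.drop p = 'w' :: 'o' :: 'o' :: t' := ht.symm
      rw [PySem.List.pyRange_one_append ((p : Int) + 1) ((p : Int) + 4) ((l.length : Int) + 1)
            (by omega) (by omega), List.foldl_append,
          PySem.List.pyRange_one_cons (show (p : Int) + 1 < (p : Int) + 4 by omega),
          show (p : Int) + 1 + 1 = (p : Int) + 2 by ring,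
          PySem.List.pyRange_one_cons (show (p : Int) + 2 < (p : Int) + 4 by omega),
          show (p : Int) + 2 + 1 = (p : Int) + 3 by ring,
          PySem.List.pyRange_one_cons (show (p : Int) + 3 < (p : Int) + 4 by omega),
          show (p : Int) + 3 + 1 = (p : Int) + 4 by ring,
          PySem.List.pyRange_one_eq_nil (le_refl ((p : Int) + 4))]
      have e1 : (if PySem.List.slice l (some (p : Int)) (some ((p : Int) + 1)) ∈ cousin
          then ((p : Int) + 1) else (p : Int)) = (p : Int) := by
        rw [slice1, hd]; norm_num [cousin]; all_goals first | rfl | decide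
      have e2 : (if PySem.List.slice l (some (p : Int)) (some ((p : Int) + 2)) ∈ cousin
          then ((p : Int) + 2) else (p : Int)) = (p : Int) := by
        rw [slice2, hd]; norm_num [cousin]; all_goals first | rfl | decide
      have e3 : (if PySem.List.slice l (some (p : Int)) (some ((p : Int) + 3)) ∈ cousin
          then ((p : Int) + 3) else (p : Int)) = (p : Int) + 3 := by
        rw [slice3, hd]; norm_num [cousin]
      simp only [List.foldl_cons, List.foldl_nil]
      rw [e1, e2, e3]
      rw [show (p : Int) + 4 = ((p + 3 : Nat) : Int) + 1 by push_cast; ring,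
          show (p : Int) + 3 = ((p + 3 : Nat) : Int) by push_cast; ring,
          loop_iff l (p + 3) hL,
          show l.drop (p + 3) = t' by
            rw [← List.drop_drop, hd]; simp,
          show okB (l.drop p) = okB t' by rw [hd]; simp [okB]]
    · -- w = "ma"
      have hL : p + 2 ≤ l.length := by
        rw [← ht] at hlen; simp at hlen; omega
      have hd : l.drop p = 'm' :: 'a' :: t' := ht.symm
      rw [PySem.List.pyRange_one_append ((p : Int) + 1) ((p : Int) + 3) ((l.length : Int) + 1)
            (by omega) (by omega), List.foldl_append,
          PySem.List.pyRange_one_cons (show (p : Int) + 1 < (p : Int) + 3 by omega),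
          show (p : Int) + 1 + 1 = (p : Int) + 2 by ring,
          PySem.List.pyRange_one_cons (show (p : Int) + 2 < (p : Int) + 3 by omega),
          show (p : Int) + 2 + 1 = (p : Int) + 3 by ring,
          PySem.List.pyRange_one_eq_nil (le_refl ((p : Int) + 3))]
      have e1 : (if PySem.List.slice l (some (p : Int)) (some ((p : Int) + 1)) ∈ cousin
          then ((p : Int) + 1) else (p : Int)) = (p : Int) := by
        rw [slice1, hd]; norm_num [cousin]; all_goals first | rfl | decide
      have e2 : (if PySem.List.slice l (some (p : Int)) (some ((p : Int) + 2)) ∈ cousin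
          then ((p : Int) + 2) else (p : Int)) = (p : Int) + 2 := by
        rw [slice2, hd]; norm_num [cousin]
      simp only [List.foldl_cons, List.foldl_nil]
      rw [e1, e2]
      rw [show (p : Int) + 3 = ((p + 2 : Nat) : Int) + 1 by push_cast; ring,
          show (p : Int) + 2 = ((p + 2 : Nat) : Int) by push_cast; ring,
          loop_iff l (p + 2) hL,
          show l.drop (p + 2) = t' by
            rw [← List.drop_drop, hd]; simp,
          show okB (l.drop p) = okB t' by rw [hd]; simp [okB]]
  · push Not at hw
    have hfix :
        ((PySem.List.pyRange ((p : Int) + 1) ((l.length : Int) + 1) 1).foldl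
          (fun s i =>
            if PySem.List.slice l (some s) (some i) ∈ cousin then i else s) (p : Int))
        = (p : Int) := by
      refine foldl_fix _ _ _ (fun i hi => ?_)
      rw [PySem.List.mem_pyRange_one] at hi
      obtain ⟨q, rfl⟩ : ∃ q : Nat, i = (q : Int) :=
        ⟨i.toNat, (Int.toNat_of_nonneg (by omega)).symm⟩
      simp only [PySem.List.slice_natCast]
      split_ifs with hmem
      · exact absurd (List.take_prefix _ _) (hw _ hmem)
      · rfl
    rw [hfix]
    rcases heq : l.drop p with _ | ⟨c, rest⟩
    · have hpn : p = l.length := by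
        have := List.drop_eq_nil_iff.mp heq; omega
      simp [okB, hpn]
    · rw [heq] at hw
      have hplt : p < l.length := by
        by_contra hcon
        have hnil : l.drop p = [] := List.drop_eq_nil_of_le (by omega)
        simp [hnil] at heq
      have n1 : ¬ ((c :: rest).take 3 = ['a','y','a']) := fun h =>
        hw ['a','y','a'] (by simp [cousin]) (h ▸ List.take_prefix 3 (c :: rest))
      have n2 : ¬ ((c :: rest).take 2 = ['y','e']) := fun h =>
        hw ['y','e'] (by simp [cousin]) (h ▸ List.take_prefix 2 (c :: rest))
      have n3 : ¬ ((c :: rest).take 3 = ['w','o','o']) := fun h =>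
        hw ['w','o','o'] (by simp [cousin]) (h ▸ List.take_prefix 3 (c :: rest))
      have n4 : ¬ ((c :: rest).take 2 = ['m','a']) := fun h =>
        hw ['m','a'] (by simp [cousin]) (h ▸ List.take_prefix 2 (c :: rest))
      have hfalse : okB (c :: rest) = false := by
        simp only [okB]
        simp
        exact ⟨⟨⟨fun h1 h2 => (n1 (by simp [h1, h2])).elim,
                 fun h1 h2 => (n2 (by simp [h1, h2])).elim⟩,
                 fun h1 h2 => (n3 (by simp [h1, h2])).elim⟩,
                 fun h1 h2 => (n4 (by simp [h1, h2])).elim⟩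
      rw [hfalse]
      simp only [Bool.false_eq_true, iff_false]
      intro h
      have : p = l.length := by exact_mod_cast h
      omega
  termination_by l.length - p
  decreasing_by all_goals omega

theorem per_string (b : String) :
    (if ((PySem.List.pyRange 1 ((b.toList.length : Int) + 1) 1).foldl
          (fun s i =>
            if PySem.List.slice b.toList (some s) (some i) ∈ cousin then i else s) 0
        = (b.toList.length : Int)) then (1:Int) else 0)
      = (if okB b.toList then 1 else 0) := by
  have h := loop_iff b.toList 0 (Nat.zero_le _)
  simp only [Nat.cast_zero, List.drop_zero, zero_add] at h
  by_cases hc : okB b.toList = true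
  · rw [if_pos (h.mpr hc), if_pos hc]
  · rw [if_neg (fun hx => hc (h.mp hx)), if_neg (by simpa using hc)]

theorem fold_agree (babbling : List String) (a : Int) :
    babbling.foldl (fun answer babble =>
      let l := babble.toList
      let start : Int :=
        (PySem.List.pyRange 1 ((l.length : Int) + 1) 1).foldl
          (fun start i =>
            if PySem.List.slice l (some start) (some i) ∈ cousin then i else start) 0
      if start = (l.length : Int) then answer + 1 else answer) a
    = babbling.foldl (fun acc b => acc + (if okB b.toList then 1 else 0)) a := by
  induction babbling generalizing a with
  | nil => rfl
  | cons b bs ih =>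
      simp only [List.foldl_cons]
      rw [ih]
      congr 1
      have h := per_string b
      split_ifs at h ⊢ <;> omega

-- ===== VERDICT (by name: the statement is the Claim_ definition above) =====
theorem solution_spec : Claim_equal_solution := by
  intro babbling _
  unfold Spec_solution solution solution_alt
  exact fold_agree babbling 0
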